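-- pv_equiv track=rewrite | github.com/MF07-Language-Programing/mf07-core-compiler | src/runtime/type_checker.py | _split_generic_args
-- ===== SOURCE A (Python) =====
-- from typing import Any, Optional, Dict, List, Tuple
--
-- def _split_generic_args(args: str) -> List[str]:
--     result: List[str] = []
--     current: List[str] = []
--     depth = 0
--     for ch in args:
--         if ch == "<":
--             depth += 1
--             current.append(ch)
--         elif ch == ">":
--             depth -= 1
--             current.append(ch)
--         elif ch == "," and depth == 0:
--             result.append("".join(current).strip())
--             current = []
--         else:
--             current.append(ch)
--     if current:
--         result.append("".join(current).strip())
--     return result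
-- ===== SOURCE B (Python) =====
-- from typing import List, Optional
--
--
-- def _top_comma(s: str) -> Optional[int]:
--     depth = 0
--     for i, ch in enumerate(s):
--         if ch == "<":
--             depth += 1
--         elif ch == ">":
--             depth -= 1
--         elif ch == "," and depth == 0:
--             return i
--     return None
--
--
-- def _split_generic_args(args: str) -> List[str]:
--     parts: List[str] = []
--     rest = args
--     while True:
--         i = _top_comma(rest)
--         if i is None:
--             if rest:
--                 parts.append(rest.strip())
--             return parts
--         parts.append(rest[:i].strip())
--         rest = rest[i + 1:]
-- ===== Notes on version B (the rewrite author's own statement) =====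
-- stated objective: alternative
-- what changed: Replaces the single character-fold with a per-character accumulator by a cut-point decomposition: a helper finds the next top-level comma index, and an outer loop slices off and strips one segment at a time, appending the final remainder only if it is nonempty.
import Mathlib
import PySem

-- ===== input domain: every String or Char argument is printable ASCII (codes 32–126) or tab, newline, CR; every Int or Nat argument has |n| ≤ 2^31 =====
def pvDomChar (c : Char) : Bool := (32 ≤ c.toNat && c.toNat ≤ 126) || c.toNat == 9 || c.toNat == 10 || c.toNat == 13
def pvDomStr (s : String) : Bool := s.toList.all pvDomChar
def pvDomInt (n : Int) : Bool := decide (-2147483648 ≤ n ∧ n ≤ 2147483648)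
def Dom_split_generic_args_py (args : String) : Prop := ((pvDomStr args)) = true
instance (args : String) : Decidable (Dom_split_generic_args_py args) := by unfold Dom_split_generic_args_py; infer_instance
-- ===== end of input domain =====

-- B re-implements the same top-level-comma split by a cut-point decomposition (find next
-- top-level comma, slice, recurse on the rest) instead of A's single fold with a character
-- accumulator; same cost, different structure.

-- ===== PORT A =====
-- the loop body of A's for-loop, on state (result, current, depth)
def stepA (st : List String × List Char × Int) (ch : Char) : List String × List Char × Int :=
  let (result, current, depth) := st
  if ch = '<' then (result, current ++ [ch], depth + 1)
  else if ch = '>' then (result, current ++ [ch], depth - 1)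
  else if ch = ',' ∧ depth = 0 then
    (result ++ [PySem.Str.strip (String.ofList current)], [], depth)
  else (result, current ++ [ch], depth)

def split_generic_args_py (args : String) : List String :=
  let st := args.toList.foldl stepA ([], [], 0)
  if st.2.1 ≠ [] then st.1 ++ [PySem.Str.strip (String.ofList st.2.1)] else st.1

-- ===== PORT B =====
-- _top_comma: index of the first comma at bracket depth 0, else none (i is the running enumerate index)
def topComma : List Char → Nat → Int → Option Nat
  | [], _, _ => none
  | ch :: s, i, depth =>
    if ch = '<' then topComma s (i + 1) (depth + 1)
    else if ch = '>' then topComma s (i + 1) (depth - 1)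
    else if ch = ',' ∧ depth = 0 then some i
    else topComma s (i + 1) depth

theorem topComma_ne_nil {l : List Char} {i : Nat} {d : Int} {j : Nat}
    (h : topComma l i d = some j) : l ≠ [] := by
  cases l with
  | nil => simp [topComma] at h
  | cons a t => simp

-- the while-loop of B, on state (parts, rest); rest[:i] / rest[i+1:] are in-range
-- nonnegative slices, ported as take/drop
def altGo (rest : List Char) (parts : List String) : List String :=
  match h : topComma rest 0 0 with
  | none => if rest ≠ [] then parts ++ [PySem.Str.strip (String.ofList rest)] else parts
  | some i =>
      altGo (rest.drop (i + 1)) (parts ++ [PySem.Str.strip (String.ofList (rest.take i))])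
termination_by rest.length
decreasing_by
  have hne := topComma_ne_nil h
  cases rest with
  | nil => exact absurd rfl hne
  | cons a t => simp only [List.length_drop, List.length_cons]; omega

def split_generic_args_py_alt (args : String) : List String :=
  altGo args.toList []

-- ===== PRECONDITION & SPEC =====
def Spec_split_generic_args_py (args : String) (out : List String) : Prop := out = split_generic_args_py_alt args
instance (args : String) (out : List String) : Decidable (Spec_split_generic_args_py args out) := by unfold Spec_split_generic_args_py; infer_instance

-- ===== CLAIM (what is proved, stated in full; the proofs are below) =====
def Claim_equal_split_generic_args_py : Prop := ∀ (args : String), Dom_split_generic_args_py args → Spec_split_generic_args_py args (split_generic_args_py args)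

-- ===== LEMMAS AND PROOFS =====

-- raw top-level segments of l scanned at starting depth d (always nonempty; last segment may be empty)
def consH (a : List Char) : List (List Char) → List (List Char)
  | [] => [a]
  | s :: ss => (a ++ s) :: ss

def segs : List Char → Int → List (List Char)
  | [], _ => [[]]
  | c :: cs, d =>
    if c = '<' then consH [c] (segs cs (d + 1))
    else if c = '>' then consH [c] (segs cs (d - 1))
    else if c = ',' ∧ d = 0 then [] :: segs cs d
    else consH [c] (segs cs d)

-- strip each segment, dropping the last iff it is empty
def fin : List (List Char) → List String
  | [] => []
  | [s] => if s = [] then [] else [PySem.Str.strip (String.ofList s)]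
  | s :: t :: r => PySem.Str.strip (String.ofList s) :: fin (t :: r)

theorem segs_ne_nil (l : List Char) (d : Int) : segs l d ≠ [] := by
  cases l with
  | nil => simp [segs]
  | cons c cs =>
    simp only [segs]
    split_ifs <;> first
      | (apply List.cons_ne_nil)
      | (unfold consH; split <;> simp)

theorem consH_consH (a b : List Char) (x : List (List Char)) (hx : x ≠ []) :
    consH a (consH b x) = consH (a ++ b) x := by
  cases x with
  | nil => exact absurd rfl hx
  | cons s ss => simp [consH]

theorem fin_cons (a : List Char) (x : List (List Char)) (hx : x ≠ []) :
    fin (a :: x) = PySem.Str.strip (String.ofList a) :: fin x := by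
  cases x with
  | nil => exact absurd rfl hx
  | cons s ss => rfl

-- A-side characterisation: the fold followed by the final guard produces res ++ fin of the segments
theorem foldA_fin (l : List Char) (res : List String) (cur : List Char) (d : Int) :
    (let st := l.foldl stepA (res, cur, d)
     if st.2.1 ≠ [] then st.1 ++ [PySem.Str.strip (String.ofList st.2.1)] else st.1)
      = res ++ fin (consH cur (segs l d)) := by
  induction l generalizing res cur d with
  | nil =>
    simp only [List.foldl_nil, segs, consH, fin]
    split_ifs with h1 h2 h2 <;> simp_all
  | cons c cs ih =>
    simp only [List.foldl_cons, stepA, segs]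
    by_cases h1 : c = '<'
    · simp only [if_pos h1]
      rw [ih, consH_consH _ _ _ (segs_ne_nil _ _)]
    · by_cases h2 : c = '>'
      · simp only [if_neg h1, if_pos h2]
        rw [ih, consH_consH _ _ _ (segs_ne_nil _ _)]
      · by_cases h3 : c = ',' ∧ d = 0
        · simp only [if_neg h1, if_neg h2, if_pos h3]
          rw [ih]
          have h0 : consH cur ([] :: segs cs d) = cur :: segs cs d := by simp [consH]
          rw [h0, fin_cons _ _ (segs_ne_nil _ _)]
          have h4 : consH ([] : List Char) (segs cs d) = segs cs d := by
            cases hs : segs cs d with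
            | nil => exact absurd hs (segs_ne_nil _ _)
            | cons s ss => simp [consH]
          rw [h4]; simp
        · simp only [if_neg h1, if_neg h2, if_neg h3]
          rw [ih, consH_consH _ _ _ (segs_ne_nil _ _)]

-- B-side: topComma's answer decomposes segs at the first top-level comma
theorem topComma_none_segs (l : List Char) (i : Nat) (d : Int)
    (h : topComma l i d = none) : segs l d = [l] := by
  induction l generalizing i d with
  | nil => simp [segs]
  | cons c cs ih =>
    simp only [topComma] at h
    simp only [segs]
    split_ifs at h ⊢ with h1 h2 h3
    all_goals rw [ih _ _ h]; simp [consH]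

theorem topComma_some_segs (l : List Char) (i0 : Nat) (d : Int) (j : Nat)
    (h : topComma l i0 d = some j) :
    i0 ≤ j ∧ j - i0 < l.length ∧
      segs l d = (l.take (j - i0)) :: segs (l.drop (j - i0 + 1)) 0 := by
  induction l generalizing i0 d with
  | nil => simp [topComma] at h
  | cons c cs ih =>
    simp only [topComma] at h
    simp only [segs]
    split_ifs at h ⊢ with h1 h2 h3
    · obtain ⟨hle, hlt, hseg⟩ := ih _ _ h
      refine ⟨by omega, by simp; omega, ?_⟩
      rw [hseg]
      have hk : j - i0 = (j - (i0 + 1)) + 1 := by omega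
      simp [consH, hk]
    · obtain ⟨hle, hlt, hseg⟩ := ih _ _ h
      refine ⟨by omega, by simp; omega, ?_⟩
      rw [hseg]
      have hk : j - i0 = (j - (i0 + 1)) + 1 := by omega
      simp [consH, hk]
    · cases h
      obtain ⟨hc, hd⟩ := h3
      subst hd
      simp
    · obtain ⟨hle, hlt, hseg⟩ := ih _ _ h
      refine ⟨by omega, by simp; omega, ?_⟩
      rw [hseg]
      have hk : j - i0 = (j - (i0 + 1)) + 1 := by omega
      simp [consH, hk]

theorem altGo_fin (l : List Char) (parts : List String) :
    altGo l parts = parts ++ fin (segs l 0) := by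
  induction hn : l.length using Nat.strong_induction_on generalizing l parts with
  | _ n ih =>
    rw [altGo]
    split
    next heq =>
      rw [topComma_none_segs _ _ _ heq]
      simp only [fin]
      by_cases hl : l = [] <;> simp [hl]
    next j heq =>
      obtain ⟨_, hlt, hseg⟩ := topComma_some_segs l 0 0 j heq
      simp only [Nat.sub_zero] at hlt hseg
      rw [hseg, fin_cons _ _ (segs_ne_nil _ _)]
      rw [ih (l.drop (j + 1)).length (by subst hn; simp only [List.length_drop]; omega) _ _ rfl]
      simp

-- ===== VERDICT (by name: the statement is the Claim_ definition above) =====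
theorem split_generic_args_py_spec : Claim_equal_split_generic_args_py := by
  intro args _
  unfold Spec_split_generic_args_py split_generic_args_py split_generic_args_py_alt
  rw [altGo_fin, foldA_fin]
  have h := segs_ne_nil args.toList 0
  cases hs : segs args.toList 0 with
  | nil => exact absurd hs h
  | cons s ss => simp [consH]
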